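-- pv_equiv track=rewrite | github.com/cirosantilli/project-euler-solvers | solvers/580.py | sq1_prefix_small
-- ===== SOURCE A (Python) =====
-- import math
--
-- def primes_upto(n: int) -> list[int]:
--     """Simple sieve, returns all primes <= n."""
--     if n < 2:
--         return []
--     sieve = bytearray(b"\x01") * (n + 1)
--     sieve[0:2] = b"\x00\x00"
--     r = int(n**0.5)
--     for p in range(2, r + 1):
--         if sieve[p]:
--             step = p
--             start = p * p
--             sieve[start : n + 1 : step] = b"\x00" * (((n - start) // step) + 1)
--     return [i for i in range(2, n + 1) if sieve[i]]
--
-- def sq1_prefix_small(limit: int) -> list[int]: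
--     """
--     Prefix table P where P[x] = # { n<=x : n is squarefree and n≡1 (mod 4) }.
--     Works for small limit (here around N^(1/3)).
--     """
--     if limit <= 0:
--         return [0]
--     is_sqfree = bytearray(b"\x01") * (limit + 1)
--     is_sqfree[0] = 0
--     # Sieve out multiples of p^2
--     for p in primes_upto(math.isqrt(limit)):
--         sq = p * p
--         is_sqfree[sq : limit + 1 : sq] = b"\x00" * (((limit - sq) // sq) + 1)
--
--     pref = [0] * (limit + 1)
--     c = 0
--     for n in range(1, limit + 1):
--         if is_sqfree[n] and (n & 3) == 1:
--             c += 1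
--         pref[n] = c
--     return pref
-- ===== SOURCE B (Python) =====
-- def sq1_prefix_small(limit: int) -> list[int]:
--     """
--     Prefix table P where P[x] = # { n<=x : n is squarefree and n≡1 (mod 4) }.
--     Smallest-prime-factor table + per-n factor scan instead of a prime list
--     and a p^2 multiple sieve.
--     """
--     if limit <= 0:
--         return [0]
--     spf = [0] * (limit + 1)
--     for j in range(2, limit + 1):
--         if spf[j] == 0:  # j is prime
--             for m in range(j, limit + 1, j):
--                 if spf[m] == 0:
--                     spf[m] = j
--
--     def squarefree(m: int) -> bool:
--         while m > 1:
--             p = spf[m]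
--             m //= p
--             if m % p == 0:
--                 return False
--         return True
--
--     pref = [0]
--     c = 0
--     for n in range(1, limit + 1):
--         if squarefree(n) and n % 4 == 1:
--             c += 1
--         pref.append(c)
--     return pref
-- ===== Notes on version B (the rewrite author's own statement) =====
-- stated objective: alternative
-- what changed: Replaces the primes_upto helper plus p^2 slice-sieve over a byte flag array with a smallest-prime-factor table built by one sieve and a per-n factor scan that detects a repeated prime factor, computing the same prefix counts.
import Mathlib
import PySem

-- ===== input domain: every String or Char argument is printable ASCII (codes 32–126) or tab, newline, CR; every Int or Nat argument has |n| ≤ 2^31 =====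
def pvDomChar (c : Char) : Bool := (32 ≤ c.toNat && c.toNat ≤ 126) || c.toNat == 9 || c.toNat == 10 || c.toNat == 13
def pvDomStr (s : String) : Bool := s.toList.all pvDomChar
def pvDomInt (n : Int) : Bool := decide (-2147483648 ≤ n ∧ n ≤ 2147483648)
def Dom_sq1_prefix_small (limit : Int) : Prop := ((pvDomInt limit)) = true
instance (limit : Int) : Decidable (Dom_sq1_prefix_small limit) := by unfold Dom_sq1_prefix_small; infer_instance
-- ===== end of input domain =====

-- B replaces the prime-list helper plus p^2 multiple sieve over a byte flag array with a
-- smallest-prime-factor table and a per-n repeated-factor scan (alternative algorithm).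

-- ===== PORT A =====

-- Python `sieve[start : n+1 : step] = b"\x00" * (((n-start)//step)+1)`:
-- writes false at start, start+step, …, that many positions (all ≤ n when start ≤ n).
def pvMark (a : Array Bool) (start step n : Nat) : Array Bool :=
  (List.range' start ((n - start) / step + 1) step).foldl
    (fun b i => b.setIfInBounds i false) a

def primesUpto (n : Nat) : List Nat :=
  if n < 2 then []
  else
    -- bytearray of ones; sieve[0:2] = b"\x00\x00"
    let sieve := ((Array.replicate (n + 1) true).setIfInBounds 0 false).setIfInBounds 1 false
    -- r = int(n**0.5): equals the integer sqrt for every n reached under Dom (n ≤ isqrt 2^31)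
    let r := Nat.sqrt n
    let sieve := (List.range' 2 (r + 1 - 2)).foldl
      (fun s p => if s.getD p false then pvMark s (p * p) p n else s) sieve
    (List.range' 2 (n + 1 - 2)).filter (fun i => sieve.getD i false)

def sq1_prefix_small (limit : Int) : List Int :=
  if limit ≤ 0 then [0]
  else
    let L := limit.toNat
    let isq0 := (Array.replicate (L + 1) true).setIfInBounds 0 false
    -- for p in primes_upto(math.isqrt(limit)): sieve out multiples of p*p
    let isq := (primesUpto (Nat.sqrt L)).foldl (fun s p => pvMark s (p * p) (p * p) L) isq0
    -- pref[0] = 0; pref[n] = running count c  (list accumulated reversed, then flipped)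
    let res := (List.range' 1 L).foldl
      (fun (st : Int × List Int) n =>
        let c := if isq.getD n false && (n &&& 3) == 1 then st.1 + 1 else st.1
        (c, c :: st.2)) ((0 : Int), ([] : List Int))
    (0 : Int) :: res.2.reverse

-- ===== PORT B =====

-- spf[m] = smallest prime factor of m (0 while unset): the nested sieve of Source B
def spfBuild (L : Nat) : Array Nat :=
  (List.range' 2 (L + 1 - 2)).foldl
    (fun a j =>
      if a.getD j 0 == 0 then
        (List.range' j ((L - j) / j + 1) j).foldl
          (fun b m => if b.getD m 0 == 0 then b.setIfInBounds m j else b) a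
      else a)
    (Array.replicate (L + 1) 0)

-- the `while m > 1` loop of squarefree(); the `spf.getD m 0 ≤ 1` guard only makes the
-- recursion total (it is never taken for the spf table built above)
def sqfreeLoop (spf : Array Nat) (m : Nat) : Bool :=
  if h1 : m ≤ 1 then true
  else if hp : spf.getD m 0 ≤ 1 then true
  else if m / spf.getD m 0 % spf.getD m 0 == 0 then false
  else sqfreeLoop spf (m / spf.getD m 0)
termination_by m
decreasing_by exact Nat.div_lt_self (by omega) (by omega)

def sq1_prefix_small_alt (limit : Int) : List Int :=
  if limit ≤ 0 then [0]
  else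
    let L := limit.toNat
    let spf := spfBuild L
    let res := (List.range' 1 L).foldl
      (fun (st : Int × List Int) n =>
        let c := if sqfreeLoop spf n && n % 4 == 1 then st.1 + 1 else st.1
        (c, c :: st.2)) ((0 : Int), ([] : List Int))
    (0 : Int) :: res.2.reverse

-- ===== PRECONDITION & SPEC =====
def Spec_sq1_prefix_small (limit : Int) (out : List Int) : Prop := out = sq1_prefix_small_alt limit
instance (limit : Int) (out : List Int) : Decidable (Spec_sq1_prefix_small limit out) := by unfold Spec_sq1_prefix_small; infer_instance

-- ===== CLAIM (what is proved, stated in full; the proofs are below) =====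
def Claim_equal_sq1_prefix_small : Prop := ∀ (limit : Int), Dom_sq1_prefix_small limit → Spec_sq1_prefix_small limit (sq1_prefix_small limit)

-- ===== LEMMAS AND PROOFS =====

theorem pvContains_eq_false {l : List Nat} {i : Nat} (h : i ∉ l) : l.contains i = false := by
  simpa using h

theorem pvContains_eq_true {l : List Nat} {i : Nat} (h : i ∈ l) : l.contains i = true := by
  simpa using h

theorem pvFoldl_congr_mem {α β : Type} (l : List α) (f g : β → α → β) (b : β)
    (h : ∀ x ∈ l, ∀ s, f s x = g s x) : l.foldl f b = l.foldl g b := by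
  induction l generalizing b with
  | nil => rfl
  | cons x xs ih =>
      simp only [List.foldl_cons]
      rw [h x (by simp), ih _ (fun y hy s => h y (by simp [hy]) s)]

-- membership in the marked index list `range' d ((L-d)/d + 1) d` is divisibility by d
theorem pvMem_markRange (d i L : Nat) (hd : 1 ≤ d) (hi1 : 1 ≤ i) (hiL : i ≤ L) :
    (i ∈ List.range' d ((L - d) / d + 1) d) ↔ d ∣ i := by
  constructor
  · intro hmem
    rcases List.mem_range'.mp hmem with ⟨t, _, rfl⟩
    exact ⟨1 + t, by ring⟩
  · rintro ⟨s, rfl⟩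
    have hs1 : 1 ≤ s := by
      by_contra h
      have : s = 0 := by omega
      subst this; simp at hi1
    rcases Nat.exists_eq_add_of_le hs1 with ⟨k, rfl⟩
    refine List.mem_range'.mpr ⟨k, ?_, by ring⟩
    have h1 : k * d ≤ L - d := by
      have h2 : d * (1 + k) ≤ L := hiL
      have h3 : k * d = d * (1 + k) - d := by ring_nf; omega
      omega
    have := (Nat.le_div_iff_mul_le (by omega : 0 < d)).mpr h1
    omega

-- value of an unconditional false-marking fold at an in-bounds index
theorem pvSetFalse_foldl_getD (l : List Nat) (a : Array Bool) (i : Nat) (hi : i < a.size) :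
    ((l.foldl (fun b j => b.setIfInBounds j false) a).getD i false)
      = (a.getD i false && !(l.contains i)) := by
  induction l generalizing a with
  | nil => simp
  | cons x xs ih =>
      simp only [List.foldl_cons]
      rw [ih _ (by simp [hi])]
      by_cases hx : x = i
      · subst hx
        simp [Array.getD_eq_getD_getElem?, Array.getElem?_setIfInBounds, hi]
      · simp [Array.getD_eq_getD_getElem?, Array.getElem?_setIfInBounds, hx, Ne.symm hx]

theorem pvSetFalse_foldl_size (l : List Nat) (a : Array Bool) :
    (l.foldl (fun b j => b.setIfInBounds j false) a).size = a.size := by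
  induction l generalizing a with
  | nil => rfl
  | cons x xs ih => simp [List.foldl_cons, ih]

theorem pvMark_size (a : Array Bool) (s t n : Nat) : (pvMark a s t n).size = a.size :=
  pvSetFalse_foldl_size _ _

theorem pvMark_getD (a : Array Bool) (s t n i : Nat) (hi : i < a.size) :
    (pvMark a s t n).getD i false
      = (a.getD i false && !((List.range' s ((n - s) / t + 1) t).contains i)) :=
  pvSetFalse_foldl_getD _ _ _ hi

-- every element of primes_upto m lies in [2, m]
theorem primesUpto_mem_range {m e : Nat} (he : e ∈ primesUpto m) : 2 ≤ e ∧ e ≤ m := by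
  unfold primesUpto at he
  split at he
  · simp at he
  · rcases List.mem_filter.mp he with ⟨hr, _⟩
    rcases List.mem_range'.mp hr with ⟨t, ht, rfl⟩
    omega

-- primes are never struck by the inner sieve, so membership is complete for primes
theorem primesUpto_complete {m p : Nat} (hp : p.Prime) (hle : p ≤ m) : p ∈ primesUpto m := by
  have hp2 : 2 ≤ p := hp.two_le
  have hm2 : ¬ m < 2 := by omega
  unfold primesUpto
  rw [if_neg hm2]
  have key : ∀ (l : List Nat) (s : Array Bool), (∀ q ∈ l, 2 ≤ q) → s.size = m + 1 →
      s.getD p false = true →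
      ((l.foldl (fun s q => if s.getD q false then pvMark s (q * q) q m else s) s).getD p false = true ∧
       (l.foldl (fun s q => if s.getD q false then pvMark s (q * q) q m else s) s).size = m + 1) := by
    intro l
    induction l with
    | nil => intro s _ h1 h2; exact ⟨h2, h1⟩
    | cons q qs ih =>
        intro s hq hsz hp'
        simp only [List.foldl_cons]
        by_cases hcond : s.getD q false
        · rw [if_pos hcond]
          refine ih _ (fun x hx => hq x (by simp [hx])) (by rw [pvMark_size]; exact hsz) ?_
          rw [pvMark_getD _ _ _ _ _ (by omega), hp', Bool.true_and]
          have hq2 : 2 ≤ q := hq q (by simp)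
          have hnot : p ∉ List.range' (q * q) ((m - q * q) / q + 1) q := by
            intro hmem
            rcases List.mem_range'.mp hmem with ⟨t, _, heq⟩
            have hdv : q ∣ p := ⟨q + t, by rw [heq]; ring⟩
            rcases hp.eq_one_or_self_of_dvd q hdv with h1 | h1
            · omega
            · nlinarith
          rw [pvContains_eq_false hnot]
          rfl
        · rw [if_neg hcond]
          exact ih _ (fun x hx => hq x (by simp [hx])) hsz hp'
  have init_p : (((Array.replicate (m + 1) true).setIfInBounds 0 false).setIfInBounds 1 false).getD p false = true := by
    simp [Array.getD_eq_getD_getElem?, Array.getElem?_setIfInBounds, Array.getElem?_replicate]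
    rw [if_neg (by omega), if_neg (by omega), if_pos hle]
    rfl
  have hrange : ∀ q ∈ List.range' 2 (Nat.sqrt m + 1 - 2), 2 ≤ q := by
    intro q hq; rcases List.mem_range'.mp hq with ⟨t, _, rfl⟩; omega
  have := key _ _ hrange (by simp) init_p
  refine List.mem_filter.mpr ⟨?_, by simpa using this.1⟩
  exact List.mem_range'.mpr ⟨p - 2, by omega, by omega⟩

-- A's flag array value is squarefreeness, for 1 ≤ n ≤ L
theorem flagA_eq (L n : Nat) (hn1 : 1 ≤ n) (hnL : n ≤ L) :
    ((primesUpto (Nat.sqrt L)).foldl (fun s p => pvMark s (p * p) (p * p) L)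
        ((Array.replicate (L + 1) true).setIfInBounds 0 false)).getD n false
      = decide (Squarefree n) := by
  have gen : ∀ (l : List Nat) (a : Array Bool), a.size = L + 1 →
      ((l.foldl (fun s p => pvMark s (p * p) (p * p) L) a).getD n false
        = (a.getD n false && l.all (fun p => !((List.range' (p*p) ((L - p*p)/(p*p) + 1) (p*p)).contains n)))) := by
    intro l
    induction l with
    | nil => intro a _; simp
    | cons q qs ih =>
        intro a hsz
        simp only [List.foldl_cons]
        rw [ih _ (by rw [pvMark_size]; exact hsz), pvMark_getD _ _ _ _ _ (by omega)]
        simp [Bool.and_assoc]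
  rw [gen _ _ (by simp)]
  have hinit : (((Array.replicate (L + 1) true).setIfInBounds 0 false)).getD n false = true := by
    simp [Array.getD_eq_getD_getElem?, Array.getElem?_setIfInBounds, Array.getElem?_replicate]
    rw [if_neg (by omega), if_pos hnL]
    rfl
  rw [hinit, Bool.true_and]
  by_cases hsf : Squarefree n
  · simp only [hsf, decide_true]
    rw [List.all_eq_true]
    intro p hpmem
    have h2 := (primesUpto_mem_range hpmem).1
    have hnot : n ∉ List.range' (p*p) ((L - p*p)/(p*p) + 1) (p*p) := by
      intro hmem
      have hdvd : p * p ∣ n := (pvMem_markRange (p*p) n L (by nlinarith) hn1 hnL).mp hmem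
      have := hsf p hdvd
      rw [Nat.isUnit_iff] at this
      omega
    rw [pvContains_eq_false hnot]
    rfl
  · simp only [hsf, decide_false]
    rw [← Bool.not_eq_true, List.all_eq_true]
    intro hall
    apply hsf
    intro q hq
    rw [Nat.isUnit_iff]
    by_contra hq1
    have hq0 : q ≠ 0 := by rintro rfl; rw [zero_mul] at hq; rcases hq with ⟨c, hc⟩; omega
    have hq2 : 2 ≤ q := by omega
    have hpp : q.minFac.Prime := Nat.minFac_prime hq1
    have hpdvd : q.minFac * q.minFac ∣ n :=
      dvd_trans (mul_dvd_mul (Nat.minFac_dvd q) (Nat.minFac_dvd q)) hq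
    have hpn : q.minFac * q.minFac ≤ n := Nat.le_of_dvd (by omega) hpdvd
    have hpL : q.minFac ≤ Nat.sqrt L := Nat.le_sqrt.mpr (le_trans hpn hnL)
    have := hall q.minFac (primesUpto_complete hpp hpL)
    rw [pvContains_eq_true ((pvMem_markRange (q.minFac*q.minFac) n L
      (by nlinarith [hpp.two_le]) hn1 hnL).mpr hpdvd)] at this
    simp at this

-- ----- B side -----

theorem spfInner_size (l : List Nat) (j : Nat) (a : Array Nat) :
    (l.foldl (fun b m => if b.getD m 0 == 0 then b.setIfInBounds m j else b) a).size = a.size := by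
  induction l generalizing a with
  | nil => rfl
  | cons x xs ih =>
      simp only [List.foldl_cons]
      by_cases h : a.getD x 0 == 0
      · rw [if_pos h, ih, Array.size_setIfInBounds]
      · rw [if_neg h, ih]

theorem spfInner_getD (l : List Nat) (j : Nat) (a : Array Nat) (i : Nat)
    (hj : j ≠ 0) (hi : i < a.size) :
    (l.foldl (fun b m => if b.getD m 0 == 0 then b.setIfInBounds m j else b) a).getD i 0
      = if a.getD i 0 = 0 ∧ i ∈ l then j else a.getD i 0 := by
  induction l generalizing a with
  | nil => simp
  | cons x xs ih =>
      simp only [List.foldl_cons]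
      by_cases hcond : a.getD x 0 == 0
      · rw [if_pos hcond, ih _ (by simp [hi])]
        have h0 : a.getD x 0 = 0 := by simpa using hcond
        by_cases hx : x = i
        · subst hx
          have hset : (a.setIfInBounds x j).getD x 0 = j := by
            simp [Array.getD_eq_getD_getElem?, Array.getElem?_setIfInBounds, hi]
          rw [hset]
          simp [h0, hj]
        · have hset : (a.setIfInBounds x j).getD i 0 = a.getD i 0 := by
            simp [Array.getD_eq_getD_getElem?, Array.getElem?_setIfInBounds, hx]
          rw [hset]
          simp [List.mem_cons, Ne.symm hx]
      · rw [if_neg hcond, ih _ hi]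
        have h0 : ¬ a.getD x 0 = 0 := by simpa using hcond
        by_cases hx : x = i
        · subst hx
          rw [if_neg (fun h => h0 h.1), if_neg (fun h => h0 h.1)]
        · simp [List.mem_cons, Ne.symm hx]

-- the spf table holds the smallest prime factor, for 2 ≤ m ≤ L
theorem spfBuild_getD (L m : Nat) (hm : 2 ≤ m) (hmL : m ≤ L) :
    (spfBuild L).getD m 0 = m.minFac := by
  unfold spfBuild
  -- invariant: after processing j = 2..J, entry i holds minFac i when minFac i ≤ J, else 0
  have key : ∀ (cnt : Nat) (J : Nat) (a : Array Nat), a.size = L + 1 → 1 ≤ J → J + cnt ≤ L →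
      (∀ i, 2 ≤ i → i ≤ L → a.getD i 0 = if i.minFac ≤ J then i.minFac else 0) →
      (∀ i, 2 ≤ i → i ≤ L →
        ((List.range' (J + 1) cnt).foldl
          (fun a j => if a.getD j 0 == 0 then
              (List.range' j ((L - j) / j + 1) j).foldl
                (fun b m => if b.getD m 0 == 0 then b.setIfInBounds m j else b) a
            else a) a).getD i 0 = if i.minFac ≤ J + cnt then i.minFac else 0) := by
    intro cnt
    induction cnt with
    | zero => intro J a hsz hJ hJL hinv i h2 hL; simpa using hinv i h2 hL
    | succ c ih =>
        intro J a hsz hJ hJL hinv i h2 hL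
        rw [List.range'_succ, List.foldl_cons]
        have hstep_inv : ∀ i, 2 ≤ i → i ≤ L →
            (if a.getD (J+1) 0 == 0 then
              (List.range' (J+1) ((L - (J+1)) / (J+1) + 1) (J+1)).foldl
                (fun b m => if b.getD m 0 == 0 then b.setIfInBounds m (J+1) else b) a
            else a).getD i 0 = if i.minFac ≤ J + 1 then i.minFac else 0 := by
          intro i h2i hLi
          have hj2 : 2 ≤ J + 1 := by omega
          have hmfi2 : 2 ≤ i.minFac := (Nat.minFac_prime (show i ≠ 1 by omega)).two_le
          by_cases hcond : a.getD (J+1) 0 == 0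
          · rw [if_pos hcond]
            rw [spfInner_getD _ _ _ _ (by omega) (by omega), hinv i h2i hLi]
            by_cases hiJ : i.minFac ≤ J
            · rw [if_pos hiJ, if_neg (by omega ∘ And.left), if_pos (by omega)]
            · rw [if_neg hiJ]
              by_cases hdvd : (J+1) ∣ i
              · have hmem : i ∈ List.range' (J+1) ((L - (J+1)) / (J+1) + 1) (J+1) :=
                  (pvMem_markRange (J+1) i L (by omega) (by omega) hLi).mpr hdvd
                have hminle : i.minFac ≤ J + 1 := Nat.minFac_le_of_dvd hj2 hdvd
                have hmineq : i.minFac = J + 1 := by omega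
                rw [if_pos ⟨rfl, hmem⟩, if_pos hminle, hmineq]
              · have hmem : i ∉ List.range' (J+1) ((L - (J+1)) / (J+1) + 1) (J+1) := fun h =>
                  hdvd ((pvMem_markRange (J+1) i L (by omega) (by omega) hLi).mp h)
                have hngt : ¬ i.minFac ≤ J + 1 := by
                  intro hc
                  have : i.minFac = J + 1 := by omega
                  exact hdvd (this ▸ Nat.minFac_dvd i)
                rw [if_neg (fun h => hmem h.2), if_neg hngt]
          · rw [if_neg hcond]
            have h0j : ¬ a.getD (J+1) 0 = 0 := by simpa using hcond
            rw [hinv i h2i hLi]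
            have hne : i.minFac ≠ J + 1 := by
              intro he
              have hjL : J + 1 ≤ L := by omega
              have hj := hinv (J+1) (by omega) hjL
              by_cases hc : (J+1).minFac ≤ J
              · have hpr : (J+1).Prime := he ▸ Nat.minFac_prime (show i ≠ 1 by omega)
                rw [Nat.Prime.minFac_eq hpr] at hc
                omega
              · rw [if_neg hc] at hj
                exact h0j hj
            by_cases hc : i.minFac ≤ J
            · rw [if_pos hc, if_pos (by omega)]
            · rw [if_neg hc, if_neg (by omega)]
        have hsz' : (if a.getD (J+1) 0 == 0 then
              (List.range' (J+1) ((L - (J+1)) / (J+1) + 1) (J+1)).foldl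
                (fun b m => if b.getD m 0 == 0 then b.setIfInBounds m (J+1) else b) a
            else a).size = L + 1 := by
          by_cases hcond : a.getD (J+1) 0 == 0
          · rw [if_pos hcond, spfInner_size]; exact hsz
          · rw [if_neg hcond]; exact hsz
        rw [show J + (c+1) = (J+1) + c from by omega]
        exact ih (J+1) _ hsz' (by omega) (by omega) hstep_inv i h2 hL
  have hinit : ∀ i, 2 ≤ i → i ≤ L →
      (Array.replicate (L+1) (0:Nat)).getD i 0 = if i.minFac ≤ 1 then i.minFac else 0 := by
    intro i h2 hL
    have := (Nat.minFac_prime (show i ≠ 1 by omega)).two_le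
    rw [if_neg (by omega)]
    simp [Array.getD_eq_getD_getElem?, Array.getElem?_replicate]
    split <;> rfl
  have happ := key (L + 1 - 2) 1 (Array.replicate (L+1) 0) (by simp) (le_refl 1)
    (by omega) hinit m hm hmL
  have hle2 : m.minFac ≤ 1 + (L + 1 - 2) := by
    have := Nat.minFac_le (show 0 < m by omega); omega
  rw [if_pos hle2] at happ
  exact happ

theorem sqfreeLoop_eq (L : Nat) : ∀ m, 1 ≤ m → m ≤ L →
    sqfreeLoop (spfBuild L) m = decide (Squarefree m) := by
  intro m
  induction m using Nat.strong_induction_on with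
  | _ m ih =>
    intro hm1 hmL
    by_cases h1 : m ≤ 1
    · have : m = 1 := by omega
      subst this
      rw [sqfreeLoop]
      simp [squarefree_one]
    · have hm2 : 2 ≤ m := by omega
      have hspf := spfBuild_getD L m hm2 hmL
      have hpp : m.minFac.Prime := Nat.minFac_prime (by omega)
      have hp2 : 2 ≤ m.minFac := hpp.two_le
      have hdvd : m.minFac ∣ m := Nat.minFac_dvd m
      have hmul : m.minFac * (m / m.minFac) = m := Nat.mul_div_cancel' hdvd
      have hm'1 : 1 ≤ m / m.minFac := (Nat.one_le_div_iff (by omega)).mpr (Nat.minFac_le (by omega))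
      have hm'lt : m / m.minFac < m := Nat.div_lt_self (by omega) (by omega)
      rw [sqfreeLoop, dif_neg h1, hspf, dif_neg (by omega)]
      by_cases hmod : m / m.minFac % m.minFac = 0
      · rw [if_pos (by simpa using hmod)]
        have hpdvd : m.minFac * m.minFac ∣ m := by
          rcases (Nat.dvd_iff_mod_eq_zero).mpr hmod with ⟨c, hc⟩
          refine ⟨c, ?_⟩
          conv_lhs => rw [← hmul, hc]
          ring
        have : ¬ Squarefree m := by
          intro hsf
          have := hsf m.minFac hpdvd
          rw [Nat.isUnit_iff] at this
          omega
        simp [this]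
      · rw [if_neg (by simpa using hmod)]
        rw [ih _ hm'lt hm'1 (by omega)]
        have hcop : Nat.Coprime m.minFac (m / m.minFac) :=
          (Nat.Prime.coprime_iff_not_dvd hpp).mpr (fun h => hmod ((Nat.dvd_iff_mod_eq_zero).mp h))
        have hiff : Squarefree m ↔ Squarefree (m / m.minFac) := by
          conv_lhs => rw [← hmul]
          rw [Nat.squarefree_mul hcop]
          have : Squarefree m.minFac := hpp.prime.squarefree
          tauto
        simp only [decide_eq_decide]
        exact hiff.symm

-- A's (n &&& 3) == 1 equals B's n % 4 == 1
theorem pvAnd3_eq_mod4 (n : Nat) : ((n &&& 3) == 1) = ((n % 4) == 1) := by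
  have := Nat.and_two_pow_sub_one_eq_mod n 2
  norm_num at this
  rw [this]

-- ===== VERDICT (by name: the statement is the Claim_ definition above) =====
theorem sq1_prefix_small_spec : Claim_equal_sq1_prefix_small := by
  intro limit _
  unfold Spec_sq1_prefix_small
  by_cases hle : limit ≤ 0
  · simp [sq1_prefix_small, sq1_prefix_small_alt, hle]
  · simp only [sq1_prefix_small, sq1_prefix_small_alt, if_neg hle]
    have hfold : (List.range' 1 limit.toNat).foldl
        (fun (st : Int × List Int) n =>
          let c := if ((primesUpto (Nat.sqrt limit.toNat)).foldl
              (fun s p => pvMark s (p * p) (p * p) limit.toNat)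
              ((Array.replicate (limit.toNat + 1) true).setIfInBounds 0 false)).getD n false
              && (n &&& 3) == 1 then st.1 + 1 else st.1
          (c, c :: st.2)) ((0 : Int), ([] : List Int))
      = (List.range' 1 limit.toNat).foldl
        (fun (st : Int × List Int) n =>
          let c := if sqfreeLoop (spfBuild limit.toNat) n && n % 4 == 1 then st.1 + 1 else st.1
          (c, c :: st.2)) ((0 : Int), ([] : List Int)) := by
      apply pvFoldl_congr_mem
      intro n hn st
      rcases List.mem_range'.mp hn with ⟨t, ht, rfl⟩
      have hn1 : 1 ≤ 1 + 1 * t := by omega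
      have hnL : 1 + 1 * t ≤ limit.toNat := by omega
      simp only [flagA_eq _ _ hn1 hnL, sqfreeLoop_eq _ _ hn1 hnL, pvAnd3_eq_mod4]
    rw [hfold]
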